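-- pv_equiv track=rewrite | github.com/delta-exchange/trading-bots | market_maker/base.py | merge_levels
-- ===== SOURCE A (Python) =====
-- def merge_levels(orders):
--     merged_orders = []
--     last_order = None
--     for order in orders:
--         if last_order is None:
--             last_order = order
--         elif last_order['price'] == order['price']:
--             last_order['size'] = last_order['size'] + order['size']
--         else:
--             merged_orders.append(last_order)
--             last_order = order
--     if last_order is not None:
--         merged_orders.append(last_order)
--     return merged_orders
-- ===== SOURCE B (Python) =====
-- def merge_levels(orders):
--     # Run-at-a-time: treat the reversed input as a stack, pop a run head, then
--     # pop-and-fold every following order with the same price into it (mutating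
--     # the head dict in place, as the original does).
--     merged = []
--     stack = orders[::-1]
--     while stack:
--         first = stack.pop()
--         while stack and stack[-1]['price'] == first['price']:
--             first['size'] = first['size'] + stack.pop()['size']
--         merged.append(first)
--     return merged
-- ===== Notes on version B (the rewrite author's own statement) =====
-- stated objective: alternative
-- what changed: Replaces A's single pass with an Option/None last_order sentinel and a trailing conditional append by a nested run-at-a-time loop: a stack of remaining orders is consumed one maximal equal-price run per outer iteration, folding each run into its head.
import Mathlib
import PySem

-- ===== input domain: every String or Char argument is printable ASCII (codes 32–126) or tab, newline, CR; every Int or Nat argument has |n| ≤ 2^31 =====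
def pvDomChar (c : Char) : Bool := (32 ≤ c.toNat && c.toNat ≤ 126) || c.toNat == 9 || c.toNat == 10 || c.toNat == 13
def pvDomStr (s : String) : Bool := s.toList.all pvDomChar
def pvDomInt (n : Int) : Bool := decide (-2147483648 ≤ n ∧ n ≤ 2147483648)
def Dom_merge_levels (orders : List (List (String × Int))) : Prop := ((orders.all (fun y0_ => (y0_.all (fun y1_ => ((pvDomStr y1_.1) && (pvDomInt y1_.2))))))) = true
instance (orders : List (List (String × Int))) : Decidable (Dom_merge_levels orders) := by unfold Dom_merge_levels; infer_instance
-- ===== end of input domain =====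

-- B replaces A's single pass with an Option sentinel by a stack-based run-at-a-time loop (same cost);
-- both mutate the run-head dict in place in Python — the theorems below are about the return value.

-- dict primitives shared by both ports: d[k] under Pre_ (key present), and d[k] = v (overwrite in place / append)
def dGet (d : List (String × Int)) (k : String) : Int := (PySem.Dict.mk d).getD k 0
def dSet (d : List (String × Int)) (k : String) (v : Int) : List (String × Int) :=
  ((PySem.Dict.mk d).insert k v).items
def hasKey (d : List (String × Int)) (k : String) : Bool := (PySem.Dict.mk d).contains k

-- ===== PORT A =====
-- one loop iteration of A: state = (merged_orders, last_order)
def mergeStepA (st : List (List (String × Int)) × Option (List (String × Int)))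
    (order : List (String × Int)) : List (List (String × Int)) × Option (List (String × Int)) :=
  match st.2 with
  | none => (st.1, some order)
  | some lo =>
    if dGet lo "price" = dGet order "price" then
      (st.1, some (dSet lo "size" (dGet lo "size" + dGet order "size")))
    else
      (st.1 ++ [lo], some order)

-- A's trailing 'if last_order is not None: merged_orders.append(last_order)'
def finishA (st : List (List (String × Int)) × Option (List (String × Int))) :
    List (List (String × Int)) :=
  match st.2 with
  | none => st.1
  | some lo => st.1 ++ [lo]

def merge_levels (orders : List (List (String × Int))) : List (List (String × Int)) :=
  finishA (orders.foldl mergeStepA ([], none))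

-- ===== PORT B =====
-- B's inner while: fold every next order with the same price into the run head `first`;
-- returns the finished head and the unconsumed remainder of the stack.
def runB (first : List (String × Int)) :
    List (List (String × Int)) → List (String × Int) × List (List (String × Int))
  | [] => (first, [])
  | o :: rest =>
    if dGet o "price" = dGet first "price" then
      runB (dSet first "size" (dGet first "size" + dGet o "size")) rest
    else
      (first, o :: rest)

-- needed by merge_levels_alt's termination proof
theorem runB_length_le (rest : List (List (String × Int))) (first : List (String × Int)) :
    (runB first rest).2.length ≤ rest.length := by
  induction rest generalizing first with
  | nil => simp [runB]
  | cons o rs ih =>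
    simp only [runB]
    split
    · exact Nat.le_succ_of_le (ih _)
    · simp

-- B's outer while over the stack of remaining orders
def merge_levels_alt (orders : List (List (String × Int))) : List (List (String × Int)) :=
  match orders with
  | [] => []
  | o :: rest =>
    let p := runB o rest
    p.1 :: merge_levels_alt p.2
termination_by orders.length
decreasing_by
  exact Nat.lt_succ_of_le (runB_length_le rest o)

-- ===== PRECONDITION & SPEC =====
-- Pre_ is exactly where the Python A returns (B raises on the same inputs): with two or more
-- orders every order needs a 'price' key, and two adjacent orders with equal prices both need
-- a 'size' key — otherwise A raises KeyError.
def Pre_merge_levels (orders : List (List (String × Int))) : Prop :=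
  (orders.length ≤ 1 ∨ ∀ o ∈ orders, hasKey o "price" = true) ∧
  List.IsChain (fun a b => dGet a "price" = dGet b "price" →
    hasKey a "size" = true ∧ hasKey b "size" = true) orders
instance (orders : List (List (String × Int))) : Decidable (Pre_merge_levels orders) := by
  unfold Pre_merge_levels; infer_instance

def pvWitness_merge_levels : (List (List (String × Int))) :=
  [[("price", 5), ("size", 2)], [("price", 5), ("size", 3)], [("price", 4), ("size", 1)]]

def Spec_merge_levels (orders : List (List (String × Int))) (out : List (List (String × Int))) : Prop := out = merge_levels_alt orders
instance (orders : List (List (String × Int))) (out : List (List (String × Int))) : Decidable (Spec_merge_levels orders out) := by unfold Spec_merge_levels; infer_instance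

-- ===== CLAIM (what is proved, stated in full; the proofs are below) =====
def Claim_equal_merge_levels : Prop := ∀ (orders : List (List (String × Int))), Dom_merge_levels orders → Pre_merge_levels orders → Spec_merge_levels orders (merge_levels orders)

-- ===== LEMMAS AND PROOFS =====

-- Main invariant: A's fold from state (acc, some lo) over the rest of the list produces
-- acc followed by B's output on lo :: rest (holds for ALL inputs, no precondition needed).
theorem mergeA_invariant (rest : List (List (String × Int)))
    (acc : List (List (String × Int))) (lo : List (String × Int)) :
    finishA (rest.foldl mergeStepA (acc, some lo)) = acc ++ merge_levels_alt (lo :: rest) := by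
  induction rest generalizing acc lo with
  | nil => simp [finishA, merge_levels_alt, runB]
  | cons o rs ih =>
    simp only [List.foldl_cons, mergeStepA]
    by_cases h : dGet lo "price" = dGet o "price"
    · rw [if_pos h, ih]
      conv_rhs => rw [merge_levels_alt]
      rw [merge_levels_alt]
      simp only [runB, if_pos h.symm]
    · rw [if_neg h, ih]
      conv_rhs => rw [merge_levels_alt]
      have h' : ¬ dGet o "price" = dGet lo "price" := fun e => h e.symm
      simp only [runB, if_neg h', List.append_assoc, List.singleton_append]

-- ===== VERDICT (by name: the statement is the Claim_ definition above) =====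
theorem merge_levels_spec : Claim_equal_merge_levels := by
  intro orders _ _
  unfold Spec_merge_levels merge_levels
  cases orders with
  | nil => simp [finishA, merge_levels_alt]
  | cons o rest =>
    simp only [List.foldl_cons, mergeStepA]
    simpa using mergeA_invariant rest [] o
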